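-- pv_equiv track=rewrite | github.com/abaj8494/math | symmetry/dot-puzzle/naked.py | backtrack
-- ===== SOURCE A (Python) =====
-- def generate_directions():
--     # All 8 cardinal and diagonal directions
--     return [(dx, dy) for dx in range(-1, 2) for dy in range(-1, 2)
--             if not (dx == 0 and dy == 0)]
--
-- def extend_line(start, direction, limit=10):
--     """Yield points along a direction, extending out to a limit in both directions."""
--     x, y = start
--     dx, dy = direction
--     for length in range(1, limit):
--         yield (x + dx * length, y + dy * length)
--
-- def points_on_segment(p1, p2, grid):
--     """Return grid points on the segment from p1 to p2."""
--     x0, y0 = p1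
--     x1, y1 = p2
--     result = set()
--     for px, py in grid:
--         if is_colinear(p1, p2, (px, py)) and is_between(p1, p2, (px, py)):
--             result.add((px, py))
--     return result
--
-- def is_colinear(p1, p2, p):
--     """Check if point p is on line p1-p2."""
--     (x0, y0), (x1, y1), (x, y) = p1, p2, p
--     return (x1 - x0)*(y - y0) == (y1 - y0)*(x - x0)
--
-- def is_between(p1, p2, p):
--     """Check if p is between p1 and p2 (inclusive)."""
--     x0, y0 = p1
--     x1, y1 = p2
--     x, y = p
--     return min(x0, x1) <= x <= max(x0, x1) and min(y0, y1) <= y <= max(y0, y1)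
--
-- def backtrack(N, current, lines_used, max_lines, covered, path, grid):
--     if covered == grid:
--         return True, path
--     if lines_used >= max_lines:
--         return False, None
--
--     for direction in generate_directions():
--         for new_end in extend_line(current, direction, limit=N+3):
--             if new_end == current:
--                 continue
--             pts = points_on_segment(current, new_end, grid)
--             if pts - covered:  # Only proceed if new points are added
--                 new_covered = covered | pts
--                 success, full_path = backtrack(
--                     N,
--                     new_end,
--                     lines_used + 1,
--                     max_lines,
--                     new_covered,
--                     path + [(current, new_end)],
--                     grid
--                 )
--                 if success:
--                     return True, full_path
--     return False, None
-- ===== SOURCE B (Python) =====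
-- # Iterative explicit-stack DFS replacing the recursion; same preorder (children
-- # pushed in reverse so the first candidate is popped first), hence identical result.
--
-- def generate_directions():
--     return [(dx, dy) for dx in range(-1, 2) for dy in range(-1, 2)
--             if not (dx == 0 and dy == 0)]
--
-- def extend_line(start, direction, limit=10):
--     x, y = start
--     dx, dy = direction
--     for length in range(1, limit):
--         yield (x + dx * length, y + dy * length)
--
-- def points_on_segment(p1, p2, grid):
--     x0, y0 = p1
--     x1, y1 = p2
--     result = set()
--     for px, py in grid:
--         if is_colinear(p1, p2, (px, py)) and is_between(p1, p2, (px, py)):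
--             result.add((px, py))
--     return result
--
-- def is_colinear(p1, p2, p):
--     (x0, y0), (x1, y1), (x, y) = p1, p2, p
--     return (x1 - x0)*(y - y0) == (y1 - y0)*(x - x0)
--
-- def is_between(p1, p2, p):
--     x0, y0 = p1
--     x1, y1 = p2
--     x, y = p
--     return min(x0, x1) <= x <= max(x0, x1) and min(y0, y1) <= y <= max(y0, y1)
--
-- def backtrack(N, current, lines_used, max_lines, covered, path, grid):
--     stack = [(current, lines_used, covered, path)]
--     while stack:
--         cur, lu, cov, p = stack.pop()
--         if cov == grid:
--             return True, p
--         if lu >= max_lines: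
--             continue
--         children = []
--         for direction in generate_directions():
--             for new_end in extend_line(cur, direction, limit=N+3):
--                 if new_end == cur:
--                     continue
--                 pts = points_on_segment(cur, new_end, grid)
--                 if pts - cov:
--                     children.append((new_end, lu + 1, cov | pts,
--                                      p + [(cur, new_end)]))
--         stack.extend(reversed(children))
--     return False, None
-- ===== Notes on version B (the rewrite author's own statement) =====
-- stated objective: alternative
-- what changed: The recursive backtracking search is rewritten as an iterative DFS over an explicit stack of (current, lines_used, covered, path) states, expanding a node into its list of successor states and pushing them in reverse so the LIFO pop order reproduces the recursion's preorder and hence the exact same first-found path.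
import Mathlib
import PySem

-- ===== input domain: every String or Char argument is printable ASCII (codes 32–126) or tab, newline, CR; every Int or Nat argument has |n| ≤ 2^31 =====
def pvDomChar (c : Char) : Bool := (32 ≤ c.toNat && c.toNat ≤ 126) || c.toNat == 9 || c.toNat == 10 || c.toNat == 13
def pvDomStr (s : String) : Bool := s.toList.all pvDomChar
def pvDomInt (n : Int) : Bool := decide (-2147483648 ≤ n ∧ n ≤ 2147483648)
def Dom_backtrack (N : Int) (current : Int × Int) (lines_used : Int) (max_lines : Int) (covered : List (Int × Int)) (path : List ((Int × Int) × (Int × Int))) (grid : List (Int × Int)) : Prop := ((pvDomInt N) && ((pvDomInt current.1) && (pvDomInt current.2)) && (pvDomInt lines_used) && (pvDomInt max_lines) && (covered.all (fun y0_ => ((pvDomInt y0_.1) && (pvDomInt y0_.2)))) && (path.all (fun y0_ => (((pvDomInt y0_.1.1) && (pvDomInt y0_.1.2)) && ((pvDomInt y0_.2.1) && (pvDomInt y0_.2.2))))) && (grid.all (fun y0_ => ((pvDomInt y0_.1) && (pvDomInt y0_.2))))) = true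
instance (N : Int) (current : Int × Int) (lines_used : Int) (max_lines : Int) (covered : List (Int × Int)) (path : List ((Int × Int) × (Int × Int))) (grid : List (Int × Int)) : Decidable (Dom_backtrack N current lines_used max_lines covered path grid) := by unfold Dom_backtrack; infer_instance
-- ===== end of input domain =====

-- B replaces the recursion by an explicit-stack DFS with the same preorder (objective:
-- alternative decomposition); 'covered'/'grid' are Python sets, ported as element lists.

-- ===== PORT A =====
def generate_directions : List (Int × Int) :=
  (PySem.List.pyRange (-1) 2 1).flatMap (fun dx =>
    (PySem.List.pyRange (-1) 2 1).filterMap (fun dy =>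
      if dx = 0 ∧ dy = 0 then none else some (dx, dy)))

def extend_line (start : Int × Int) (direction : Int × Int) (limit : Int) : List (Int × Int) :=
  (PySem.List.pyRange 1 limit 1).map (fun len =>
    (start.1 + direction.1 * len, start.2 + direction.2 * len))

def is_colinear (p1 p2 p : Int × Int) : Bool :=
  (p2.1 - p1.1) * (p.2 - p1.2) == (p2.2 - p1.2) * (p.1 - p1.1)

def is_between (p1 p2 p : Int × Int) : Bool :=
  (min p1.1 p2.1 ≤ p.1 && p.1 ≤ max p1.1 p2.1) && (min p1.2 p2.2 ≤ p.2 && p.2 ≤ max p1.2 p2.2)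

def points_on_segment (p1 p2 : Int × Int) (grid : List (Int × Int)) : PySem.Set (Int × Int) :=
  grid.foldl (fun r q => if is_colinear p1 p2 q && is_between p1 p2 q then PySem.Set.add r q else r)
    PySem.Set.empty

mutual
  -- the recursive Python backtrack; its two nested for-loops are btDirs / btLens
  def backtrack (N : Int) (current : Int × Int) (lines_used : Int) (max_lines : Int) (covered : List (Int × Int)) (path : List ((Int × Int) × (Int × Int))) (grid : List (Int × Int)) : Bool × (Option (List ((Int × Int) × (Int × Int)))) :=
    if PySem.Set.equal covered grid then (true, some path)
    else if h2 : lines_used ≥ max_lines then (false, none)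
    else
      match btDirs N current lines_used max_lines covered path grid generate_directions (by omega) with
      | some r => r
      | none => (false, none)
  termination_by ((max_lines - lines_used).toNat, 2, 0)
  decreasing_by
    exact Prod.Lex.right _ (Prod.Lex.left _ _ (by omega))

  def btDirs (N : Int) (current : Int × Int) (lines_used : Int) (max_lines : Int) (covered : List (Int × Int)) (path : List ((Int × Int) × (Int × Int))) (grid : List (Int × Int)) (dirs : List (Int × Int)) (h : lines_used < max_lines) : Option (Bool × (Option (List ((Int × Int) × (Int × Int))))) :=
    match dirs with
    | [] => none
    | d :: ds =>
      match btLens N current lines_used max_lines covered path grid (extend_line current d (N + 3)) h with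
      | some r => some r
      | none => btDirs N current lines_used max_lines covered path grid ds h
  termination_by ((max_lines - lines_used).toNat, 1, dirs.length)
  decreasing_by
    · exact Prod.Lex.right _ (Prod.Lex.left _ _ (by omega))
    · exact Prod.Lex.right _ (Prod.Lex.right _ (by simp only [List.length_cons]; omega))

  def btLens (N : Int) (current : Int × Int) (lines_used : Int) (max_lines : Int) (covered : List (Int × Int)) (path : List ((Int × Int) × (Int × Int))) (grid : List (Int × Int)) (ends : List (Int × Int)) (h : lines_used < max_lines) : Option (Bool × (Option (List ((Int × Int) × (Int × Int))))) :=
    match ends with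
    | [] => none
    | e :: es =>
      if e = current then btLens N current lines_used max_lines covered path grid es h
      else
        let pts := points_on_segment current e grid
        if PySem.Set.diff pts covered ≠ [] then
          match backtrack N e (lines_used + 1) max_lines (PySem.Set.union covered pts) (path ++ [(current, e)]) grid with
          | (true, p) => some (true, p)
          | (false, _) => btLens N current lines_used max_lines covered path grid es h
        else btLens N current lines_used max_lines covered path grid es h
  termination_by ((max_lines - lines_used).toNat, 0, ends.length)
  decreasing_by
    · exact Prod.Lex.right _ (Prod.Lex.right _ (by simp only [List.length_cons]; omega))
    · exact Prod.Lex.left _ _ (by omega)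
    · exact Prod.Lex.right _ (Prod.Lex.right _ (by simp only [List.length_cons]; omega))
    · exact Prod.Lex.right _ (Prod.Lex.right _ (by simp only [List.length_cons]; omega))
end

-- ===== PORT B =====
-- a DFS state of Source B: (current point, lines_used, covered, path)
abbrev BtState := (Int × Int) × Int × (List (Int × Int)) × (List ((Int × Int) × (Int × Int)))

-- the 'children' list Source B builds at an expanded node (its nested loops → flatMap/filterMap)
def btChildren (N : Int) (grid : List (Int × Int)) (cur : Int × Int) (lu : Int) (cov : List (Int × Int)) (p : List ((Int × Int) × (Int × Int))) : List BtState :=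
  generate_directions.flatMap (fun d =>
    (extend_line cur d (N + 3)).filterMap (fun e =>
      if e = cur then none
      else
        let pts := points_on_segment cur e grid
        if PySem.Set.diff pts cov ≠ [] then
          some (e, lu + 1, PySem.Set.union cov pts, p ++ [(cur, e)])
        else none))

def btStMeasure (max_lines : Int) (B : Nat) (s : BtState) : Nat := B ^ (max_lines - s.2.1).toNat

-- facts cited by btRun's decreasing_by (termination of the stack loop)
theorem pvFlatMapLenLe {α β : Type} (l : List α) (g : α → List β) (m : Nat)
    (h : ∀ a, (g a).length ≤ m) : (l.flatMap g).length ≤ l.length * m := by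
  induction l with
  | nil => simp
  | cons a t ih =>
    simp only [List.flatMap_cons, List.length_append, List.length_cons]
    calc (g a).length + (t.flatMap g).length ≤ m + t.length * m := Nat.add_le_add (h a) ih
      _ = (t.length + 1) * m := by ring

theorem pvGdLength : generate_directions.length = 8 := by decide

theorem btChildren_length_le (N : Int) (grid : List (Int × Int)) (cur : Int × Int) (lu : Int) (cov : List (Int × Int)) (p : List ((Int × Int) × (Int × Int))) :
    (btChildren N grid cur lu cov p).length ≤ 8 * (N + 2).toNat := by
  unfold btChildren
  have h := pvFlatMapLenLe generate_directions
    (fun d => (extend_line cur d (N + 3)).filterMap (fun e =>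
      if e = cur then none
      else
        let pts := points_on_segment cur e grid
        if PySem.Set.diff pts cov ≠ [] then
          some (e, lu + 1, PySem.Set.union cov pts, p ++ [(cur, e)])
        else none))
    ((N + 2).toNat)
    (fun d => le_trans (List.length_filterMap_le _ _)
      (by simp only [extend_line, List.length_map, PySem.List.length_pyRange_one]; omega))
  rw [pvGdLength] at h
  exact h

theorem btChildren_lu (N : Int) (grid : List (Int × Int)) (cur : Int × Int) (lu : Int) (cov : List (Int × Int)) (p : List ((Int × Int) × (Int × Int))) (s' : BtState) (hs' : s' ∈ btChildren N grid cur lu cov p) : s'.2.1 = lu + 1 := by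
  unfold btChildren at hs'
  simp only [List.mem_flatMap, List.mem_filterMap] at hs'
  obtain ⟨d, -, e, -, he⟩ := hs'
  obtain ⟨q1, q2, q3, q4⟩ := s'
  split_ifs at he with h1 h2
  all_goals try (simp only [Option.some.injEq, Prod.mk.injEq] at he)
  all_goals try (exact he.2.1.symm)
  all_goals simp at he

theorem btChildren_sum_lt (N max_lines : Int) (grid : List (Int × Int)) (cur : Int × Int) (lu : Int) (cov : List (Int × Int)) (p : List ((Int × Int) × (Int × Int))) (h : lu < max_lines) :
    ((btChildren N grid cur lu cov p).map (btStMeasure max_lines (8 * (N + 2).toNat + 1))).sum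
      < btStMeasure max_lines (8 * (N + 2).toNat + 1) (cur, lu, cov, p) := by
  have hB : 0 < 8 * (N + 2).toNat + 1 := by omega
  have hr : (max_lines - lu).toNat = (max_lines - (lu + 1)).toNat + 1 := by omega
  have hchild : ∀ x ∈ (btChildren N grid cur lu cov p).map (btStMeasure max_lines (8 * (N + 2).toNat + 1)), x ≤ (8 * (N + 2).toNat + 1) ^ (max_lines - (lu + 1)).toNat := by
    intro x hx
    simp only [List.mem_map] at hx
    obtain ⟨s', hs', rfl⟩ := hx
    have hl := btChildren_lu N grid cur lu cov p s' hs'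
    simp [btStMeasure, hl]
  have hsum := List.sum_le_card_nsmul _ _ hchild
  rw [List.length_map] at hsum
  have hlen := btChildren_length_le N grid cur lu cov p
  have hpow : 0 < (8 * (N + 2).toNat + 1) ^ (max_lines - (lu + 1)).toNat := pow_pos hB _
  calc ((btChildren N grid cur lu cov p).map (btStMeasure max_lines (8 * (N + 2).toNat + 1))).sum
      ≤ (btChildren N grid cur lu cov p).length • (8 * (N + 2).toNat + 1) ^ (max_lines - (lu + 1)).toNat := hsum
    _ = (btChildren N grid cur lu cov p).length * (8 * (N + 2).toNat + 1) ^ (max_lines - (lu + 1)).toNat := smul_eq_mul _ _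
    _ ≤ (8 * (N + 2).toNat) * (8 * (N + 2).toNat + 1) ^ (max_lines - (lu + 1)).toNat := Nat.mul_le_mul_right _ hlen
    _ < (8 * (N + 2).toNat + 1) * (8 * (N + 2).toNat + 1) ^ (max_lines - (lu + 1)).toNat := mul_lt_mul_of_pos_right (by omega) hpow
    _ = btStMeasure max_lines (8 * (N + 2).toNat + 1) (cur, lu, cov, p) := by
        simp only [btStMeasure]
        rw [hr, pow_succ]
        ring

-- the explicit-stack DFS loop of Source B (top of stack = head; 'extend(reversed(children))'
-- followed by popping = processing 'children ++ rest')
def btRun (N : Int) (max_lines : Int) (grid : List (Int × Int)) (stack : List BtState) : Bool × (Option (List ((Int × Int) × (Int × Int)))) :=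
  match stack with
  | [] => (false, none)
  | (cur, lu, cov, p) :: rest =>
    if PySem.Set.equal cov grid then (true, some p)
    else if h2 : lu ≥ max_lines then btRun N max_lines grid rest
    else btRun N max_lines grid (btChildren N grid cur lu cov p ++ rest)
termination_by (stack.map (btStMeasure max_lines (8 * (N + 2).toNat + 1))).sum
decreasing_by
  · simp only [List.map_cons, List.sum_cons]
    have h1 : 1 ≤ btStMeasure max_lines (8 * (N + 2).toNat + 1) (cur, lu, cov, p) :=
      Nat.one_le_pow _ _ (by omega)
    omega
  · simp only [List.map_cons, List.sum_cons, List.map_append, List.sum_append]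
    have h1 := btChildren_sum_lt N max_lines grid cur lu cov p (by omega)
    omega

def backtrack_alt (N : Int) (current : Int × Int) (lines_used : Int) (max_lines : Int) (covered : List (Int × Int)) (path : List ((Int × Int) × (Int × Int))) (grid : List (Int × Int)) : Bool × (Option (List ((Int × Int) × (Int × Int)))) :=
  btRun N max_lines grid [(current, lines_used, covered, path)]

-- ===== PRECONDITION & SPEC =====
def Spec_backtrack (N : Int) (current : Int × Int) (lines_used : Int) (max_lines : Int) (covered : List (Int × Int)) (path : List ((Int × Int) × (Int × Int))) (grid : List (Int × Int)) (out : Bool × (Option (List ((Int × Int) × (Int × Int))))) : Prop := out = backtrack_alt N current lines_used max_lines covered path grid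
instance (N : Int) (current : Int × Int) (lines_used : Int) (max_lines : Int) (covered : List (Int × Int)) (path : List ((Int × Int) × (Int × Int))) (grid : List (Int × Int)) (out : Bool × (Option (List ((Int × Int) × (Int × Int))))) : Decidable (Spec_backtrack N current lines_used max_lines covered path grid out) := by unfold Spec_backtrack; infer_instance

-- ===== CLAIM (what is proved, stated in full; the proofs are below) =====
def Claim_equal_backtrack : Prop := ∀ (N : Int) (current : Int × Int) (lines_used : Int) (max_lines : Int) (covered : List (Int × Int)) (path : List ((Int × Int) × (Int × Int))) (grid : List (Int × Int)), Dom_backtrack N current lines_used max_lines covered path grid → Spec_backtrack N current lines_used max_lines covered path grid (backtrack N current lines_used max_lines covered path grid)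

-- ===== LEMMAS AND PROOFS =====

-- "first success of A's recursion over a list of DFS states", the bridge between the two ports
def tryAOpt (N : Int) (max_lines : Int) (grid : List (Int × Int)) : List BtState → Option (Bool × (Option (List ((Int × Int) × (Int × Int)))))
  | [] => none
  | (cur, lu, cov, p) :: rest =>
    match backtrack N cur lu max_lines cov p grid with
    | (true, q) => some (true, q)
    | (false, _) => tryAOpt N max_lines grid rest

theorem tryAOpt_append (N max_lines : Int) (grid : List (Int × Int)) (xs ys : List BtState) :
    tryAOpt N max_lines grid (xs ++ ys) = (tryAOpt N max_lines grid xs).or (tryAOpt N max_lines grid ys) := by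
  induction xs with
  | nil => simp [tryAOpt]
  | cons s xs ih =>
    obtain ⟨cur, lu, cov, p⟩ := s
    simp only [List.cons_append, tryAOpt]
    cases hbt : backtrack N cur lu max_lines cov p grid with
    | mk b q => cases b <;> simp [ih]

theorem tryAOpt_shape (N max_lines : Int) (grid : List (Int × Int)) (stack : List BtState) :
    tryAOpt N max_lines grid stack = none ∨ ∃ q, tryAOpt N max_lines grid stack = some (true, q) := by
  induction stack with
  | nil => left; rfl
  | cons s rest ih =>
    obtain ⟨cur, lu, cov, p⟩ := s
    simp only [tryAOpt]
    cases hbt : backtrack N cur lu max_lines cov p grid with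
    | mk b q =>
      cases b
      · simpa using ih
      · right; exact ⟨q, rfl⟩

theorem btLens_eq (N : Int) (current : Int × Int) (lines_used : Int) (max_lines : Int) (covered : List (Int × Int)) (path : List ((Int × Int) × (Int × Int))) (grid : List (Int × Int)) (h : lines_used < max_lines) (ends : List (Int × Int)) :
    btLens N current lines_used max_lines covered path grid ends h
      = tryAOpt N max_lines grid (ends.filterMap (fun e =>
          if e = current then none
          else
            let pts := points_on_segment current e grid
            if PySem.Set.diff pts covered ≠ [] then
              some (e, lines_used + 1, PySem.Set.union covered pts, path ++ [(current, e)])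
            else none)) := by
  induction ends with
  | nil => rw [btLens]; rfl
  | cons e es ih =>
    rw [btLens]
    simp only [List.filterMap_cons]
    by_cases hc : e = current
    · simp only [hc, if_pos rfl, ite_true]
      exact ih
    · simp only [if_neg hc]
      by_cases hd : PySem.Set.diff (points_on_segment current e grid) covered ≠ []
      · simp only [hd, ite_true, if_pos hd]
        cases hbt : backtrack N e (lines_used + 1) max_lines (PySem.Set.union covered (points_on_segment current e grid)) (path ++ [(current, e)]) grid with
        | mk b q =>
          cases b <;> simp [tryAOpt, hbt, ih]
      · simp only [hd, ite_false, if_neg hd]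
        exact ih

theorem btDirs_eq (N : Int) (current : Int × Int) (lines_used : Int) (max_lines : Int) (covered : List (Int × Int)) (path : List ((Int × Int) × (Int × Int))) (grid : List (Int × Int)) (h : lines_used < max_lines) (dirs : List (Int × Int)) :
    btDirs N current lines_used max_lines covered path grid dirs h
      = tryAOpt N max_lines grid (dirs.flatMap (fun d =>
          (extend_line current d (N + 3)).filterMap (fun e =>
            if e = current then none
            else
              let pts := points_on_segment current e grid
              if PySem.Set.diff pts covered ≠ [] then
                some (e, lines_used + 1, PySem.Set.union covered pts, path ++ [(current, e)])
              else none))) := by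
  induction dirs with
  | nil => rw [btDirs]; rfl
  | cons d ds ih =>
    rw [btDirs]
    simp only [List.flatMap_cons, tryAOpt_append]
    rw [btLens_eq]
    cases h1 : tryAOpt N max_lines grid ((extend_line current d (N + 3)).filterMap _) with
    | none => simp [Option.or, ih]
    | some r => simp [Option.or]

-- A's backtrack, characterised through the successor-state list of B
theorem backtrack_children (N : Int) (cur : Int × Int) (lu : Int) (max_lines : Int) (cov : List (Int × Int)) (p : List ((Int × Int) × (Int × Int))) (grid : List (Int × Int)) :
    backtrack N cur lu max_lines cov p grid
      = if PySem.Set.equal cov grid then (true, some p)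
        else if lu ≥ max_lines then (false, none)
        else
          match tryAOpt N max_lines grid (btChildren N grid cur lu cov p) with
          | some r => r
          | none => (false, none) := by
  rw [backtrack]
  split_ifs with h1 h2
  · rfl
  · rfl
  · rw [btDirs_eq]
    rfl

theorem backtrack_shape (N : Int) (cur : Int × Int) (lu : Int) (max_lines : Int) (cov : List (Int × Int)) (p : List ((Int × Int) × (Int × Int))) (grid : List (Int × Int)) :
    backtrack N cur lu max_lines cov p grid = (false, none) ∨ ∃ q, backtrack N cur lu max_lines cov p grid = (true, q) := by
  rw [backtrack_children]
  split_ifs with h1 h2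
  · right; exact ⟨some p, rfl⟩
  · left; rfl
  · rcases tryAOpt_shape N max_lines grid (btChildren N grid cur lu cov p) with hn | ⟨q, hq⟩
    · rw [hn]; left; rfl
    · rw [hq]; right; exact ⟨q, rfl⟩

theorem btRun_eq (N max_lines : Int) (grid : List (Int × Int)) (n : Nat) :
    ∀ stack : List BtState, (stack.map (btStMeasure max_lines (8 * (N + 2).toNat + 1))).sum ≤ n →
      btRun N max_lines grid stack
        = match tryAOpt N max_lines grid stack with
          | some r => r
          | none => (false, none) := by
  induction n using Nat.strong_induction_on with
  | _ n ih =>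
    intro stack hle
    match stack with
    | [] => rw [btRun]; rfl
    | (cur, lu, cov, p) :: rest =>
      have hm1 : 1 ≤ btStMeasure max_lines (8 * (N + 2).toNat + 1) (cur, lu, cov, p) :=
        Nat.one_le_pow _ _ (by omega)
      have hcons : ((((cur, lu, cov, p) : BtState) :: rest).map (btStMeasure max_lines (8 * (N + 2).toNat + 1))).sum
          = btStMeasure max_lines (8 * (N + 2).toNat + 1) (cur, lu, cov, p)
            + (rest.map (btStMeasure max_lines (8 * (N + 2).toNat + 1))).sum := by
        simp
      rw [btRun]
      split_ifs with h1 h2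
      · simp only [tryAOpt, backtrack_children, h1, if_pos, ite_true]
      · have hrest : (rest.map (btStMeasure max_lines (8 * (N + 2).toNat + 1))).sum < n := by omega
        rw [ih _ hrest rest (le_refl _)]
        simp only [tryAOpt, backtrack_children, h1, h2]
        simp
      · have hch := btChildren_sum_lt N max_lines grid cur lu cov p (by omega)
        have happ : ((btChildren N grid cur lu cov p ++ rest).map (btStMeasure max_lines (8 * (N + 2).toNat + 1))).sum
            = ((btChildren N grid cur lu cov p).map (btStMeasure max_lines (8 * (N + 2).toNat + 1))).sum
              + (rest.map (btStMeasure max_lines (8 * (N + 2).toNat + 1))).sum := by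
          simp
        rw [ih (((btChildren N grid cur lu cov p ++ rest).map (btStMeasure max_lines (8 * (N + 2).toNat + 1))).sum) (by omega) _ (le_refl _)]
        rw [tryAOpt_append]
        rcases tryAOpt_shape N max_lines grid (btChildren N grid cur lu cov p) with hn | ⟨q, hq⟩
        · rw [hn]
          simp only [Option.or]
          simp only [tryAOpt, backtrack_children, h1, h2, hn]
          simp
        · rw [hq]
          simp only [Option.or]
          simp only [tryAOpt, backtrack_children, h1, h2, hq]
          simp

-- ===== VERDICT (by name: the statement is the Claim_ definition above) =====
theorem backtrack_spec : Claim_equal_backtrack := by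
  intro N current lines_used max_lines covered path grid _
  unfold Spec_backtrack backtrack_alt
  rw [btRun_eq N max_lines grid _ [(current, lines_used, covered, path)] (le_refl _)]
  rcases backtrack_shape N current lines_used max_lines covered path grid with hf | ⟨q, ht⟩
  · rw [hf]
    simp [tryAOpt, hf]
  · rw [ht]
    simp [tryAOpt, ht]
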